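-- pv_equiv track=rewrite | github.com/goncaloadolfo/fish-behavior-detection | src/behavior-detection-module/rule_based/feeding_motion_level.py | extract_feeding_warnings
-- ===== SOURCE A (Python) =====
-- def extract_feeding_warnings(motion_time_series, feeding_thr, duration):
--     feeding_warnings = []
--     feeding_flag = False
--     feeding_duration = 0
--
--     for t in range(len(motion_time_series)):
--         nr_active_pixels = motion_time_series[t]
--
--         if nr_active_pixels >= feeding_thr:
--             feeding_duration += 1
--             feeding_flag = True
--
--         elif feeding_flag and feeding_duration >= duration:
--             feeding_warnings.append((t - 1 - feeding_duration, t - 1))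
--             feeding_duration = 0
--             feeding_flag = False
--
--         else:
--             feeding_duration = 0
--             feeding_flag = False
--
--         if t == len(motion_time_series) - 1 and feeding_flag:
--             feeding_warnings.append((t - feeding_duration, t))
--
--     return feeding_warnings
-- ===== SOURCE B (Python) =====
-- def extract_feeding_warnings(motion_time_series, feeding_thr, duration):
--     # Group-the-runs decomposition: locate each maximal run of active samples
--     # with an inner scan, then emit the whole run at once.
--     n = len(motion_time_series)
--     warnings = []
--     i = 0
--     while i < n:
--         if motion_time_series[i] >= feeding_thr:
--             run = 0
--             while i + run < n and motion_time_series[i + run] >= feeding_thr: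
--                 run += 1
--             end = i + run - 1
--             if end == n - 1 or run >= duration:
--                 warnings.append((i - 1, end))
--             i += run
--         else:
--             i += 1
--     return warnings
-- ===== Notes on version B (the rewrite author's own statement) =====
-- stated objective: alternative
-- what changed: Replaces A's per-sample feeding_flag/feeding_duration state machine with a group-the-runs decomposition: locate each maximal run of at-threshold samples with an inner scan and emit the whole run at once (emitted iff it touches the end of the series or is at least `duration` long).
import Mathlib
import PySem

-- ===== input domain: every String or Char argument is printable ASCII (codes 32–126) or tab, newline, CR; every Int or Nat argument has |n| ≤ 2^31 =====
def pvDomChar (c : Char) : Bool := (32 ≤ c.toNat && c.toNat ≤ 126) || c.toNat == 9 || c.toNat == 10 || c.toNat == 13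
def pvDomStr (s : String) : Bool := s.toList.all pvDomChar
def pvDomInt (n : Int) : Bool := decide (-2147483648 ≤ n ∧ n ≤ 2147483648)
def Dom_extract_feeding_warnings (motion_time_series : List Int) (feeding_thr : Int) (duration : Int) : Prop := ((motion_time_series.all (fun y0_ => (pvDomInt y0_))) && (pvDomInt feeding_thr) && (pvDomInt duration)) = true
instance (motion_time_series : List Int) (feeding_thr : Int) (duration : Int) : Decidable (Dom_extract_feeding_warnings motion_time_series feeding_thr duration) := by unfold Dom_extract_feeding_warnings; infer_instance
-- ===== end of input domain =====

-- ===== PORT A =====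
-- B replaces A's per-sample flag/counter state machine by a group-the-runs
-- decomposition (find each maximal active run, then emit it at once); same cost.

-- Loop of A: `for t in range(len(xs))` with state (warnings acc, feeding_flag, feeding_duration).
def pvALoop (thr dur n : Int) : List Int → Int → List (Int × Int) → Bool → Int → List (Int × Int)
  | [], _, acc, _, _ => acc
  | x :: rest, t, acc, flag, fd =>
    let s :=
      if thr ≤ x then (acc, true, fd + 1)
      else if flag ∧ dur ≤ fd then (acc ++ [(t - 1 - fd, t - 1)], false, (0 : Int))
      else (acc, false, (0 : Int))
    let acc2 := if t = n - 1 ∧ s.2.1 = true then s.1 ++ [(t - s.2.2, t)] else s.1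
    pvALoop thr dur n rest (t + 1) acc2 s.2.1 s.2.2

def extract_feeding_warnings (motion_time_series : List Int) (feeding_thr : Int) (duration : Int) : List (Int × Int) :=
  pvALoop feeding_thr duration (motion_time_series.length : Int) motion_time_series 0 [] false 0

-- ===== PORT B =====
-- Outer while of B: at an active sample, the inner while measures the maximal
-- active run (= takeWhile), the run is emitted at once, and the scan resumes after it.
def pvBLoop (thr dur n : Int) : List Int → Int → List (Int × Int)
  | [], _ => []
  | x :: rest, i =>
    if h : thr ≤ x then
      let k := ((x :: rest).takeWhile (fun y => decide (thr ≤ y))).length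
      let e := i + (k : Int) - 1
      (if e = n - 1 ∨ dur ≤ (k : Int) then [(i - 1, e)] else []) ++
        pvBLoop thr dur n ((x :: rest).drop k) (i + (k : Int))
    else pvBLoop thr dur n rest (i + 1)
  termination_by xs _ => xs.length
  decreasing_by
  · have hk : ((x :: rest).takeWhile (fun y => decide (thr ≤ y))).length = (rest.takeWhile (fun y => decide (thr ≤ y))).length + 1 := by
      simp [h]
    have hk2 : (rest.takeWhile (fun y => decide (thr ≤ y))).length ≤ rest.length :=
      (rest.takeWhile_sublist _).length_le
    simp only [List.length_drop, hk]
    simp only [List.length_cons]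
    omega
  · simp

def extract_feeding_warnings_alt (motion_time_series : List Int) (feeding_thr : Int) (duration : Int) : List (Int × Int) :=
  pvBLoop feeding_thr duration (motion_time_series.length : Int) motion_time_series 0

-- ===== PRECONDITION & SPEC =====
def Spec_extract_feeding_warnings (motion_time_series : List Int) (feeding_thr : Int) (duration : Int) (out : List (Int × Int)) : Prop := out = extract_feeding_warnings_alt motion_time_series feeding_thr duration
instance (motion_time_series : List Int) (feeding_thr : Int) (duration : Int) (out : List (Int × Int)) : Decidable (Spec_extract_feeding_warnings motion_time_series feeding_thr duration out) := by unfold Spec_extract_feeding_warnings; infer_instance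

-- ===== CLAIM (what is proved, stated in full; the proofs are below) =====
def Claim_equal_extract_feeding_warnings : Prop := ∀ (motion_time_series : List Int) (feeding_thr : Int) (duration : Int), Dom_extract_feeding_warnings motion_time_series feeding_thr duration → Spec_extract_feeding_warnings motion_time_series feeding_thr duration (extract_feeding_warnings motion_time_series feeding_thr duration)

-- ===== LEMMAS AND PROOFS =====

-- Accumulator-free version of A's loop, for the proofs.
def pvAGo (thr dur n : Int) : List Int → Int → Bool → Int → List (Int × Int)
  | [], _, _, _ => []
  | x :: rest, t, flag, fd =>
    if thr ≤ x then
      (if t = n - 1 then [(t - (fd + 1), t)] else []) ++ pvAGo thr dur n rest (t + 1) true (fd + 1)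
    else if flag ∧ dur ≤ fd then
      (t - 1 - fd, t - 1) :: pvAGo thr dur n rest (t + 1) false 0
    else pvAGo thr dur n rest (t + 1) false 0

lemma pvALoop_eq_acc (thr dur n : Int) : ∀ (xs : List Int) (t : Int) (acc : List (Int × Int)) (flag : Bool) (fd : Int),
    pvALoop thr dur n xs t acc flag fd = acc ++ pvAGo thr dur n xs t flag fd := by
  intro xs
  induction xs with
  | nil => intro t acc flag fd; simp [pvALoop, pvAGo]
  | cons x rest ih =>
    intro t acc flag fd
    rw [pvALoop, pvAGo]
    by_cases hx : thr ≤ x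
    · by_cases ht : t = n - 1 <;> simp [hx, ht, ih, List.append_assoc]
    · by_cases hf : flag ∧ dur ≤ fd
      · simp [hx, hf, ih, List.append_assoc]
      · simp [hx, hf, ih]

lemma pv_drop_takeWhile (p : Int → Bool) (l : List Int) :
    l.drop (l.takeWhile p).length = l.dropWhile p := by
  induction l with
  | nil => rfl
  | cons x xs ih => by_cases h : p x <;> simp [h, ih]

lemma pv_dropWhile_head_false (p : Int → Bool) : ∀ (l : List Int) (z : Int) (tail : List Int),
    l.dropWhile p = z :: tail → p z = false := by
  intro l
  induction l with
  | nil => intro z tail h; simp [List.dropWhile] at h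
  | cons x xs ih =>
    intro z tail h
    by_cases hx : p x
    · exact ih z tail (by simpa [List.dropWhile_cons, hx] using h)
    · simp [hx] at h
      simp [← h.1, hx]

-- Inside a run (flag = true, fd ≥ 1): the rest of the run has length k; the whole
-- run is emitted as one pair iff it touches the end of the series or is long enough.
lemma pvAGo_inrun (thr dur n : Int) : ∀ (xs : List Int) (t fd : Int),
    t = n - (xs.length : Int) → 1 ≤ fd → xs ≠ [] →
    pvAGo thr dur n xs t true fd =
      (if t + ((xs.takeWhile (fun y => decide (thr ≤ y))).length : Int) - 1 = n - 1
          ∨ dur ≤ fd + ((xs.takeWhile (fun y => decide (thr ≤ y))).length : Int)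
        then [(t - fd - 1, t + ((xs.takeWhile (fun y => decide (thr ≤ y))).length : Int) - 1)] else []) ++
        pvAGo thr dur n (xs.drop ((xs.takeWhile (fun y => decide (thr ≤ y))).length + 1))
          (t + ((xs.takeWhile (fun y => decide (thr ≤ y))).length : Int) + 1) false 0 := by
  intro xs
  induction xs with
  | nil => intro t fd _ _ hne; exact absurd rfl hne
  | cons x rest ih =>
    intro t fd ht hfd _
    by_cases hx : thr ≤ x
    · have hk : (x :: rest).takeWhile (fun y => decide (thr ≤ y)) =
          x :: rest.takeWhile (fun y => decide (thr ≤ y)) := by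
        simp [hx]
      rcases rest with _ | ⟨y, rest'⟩
      · have htn : t = n - 1 := by simp at ht; omega
        rw [pvAGo]
        simp only [hx, if_pos, htn, hk]
        simp [pvAGo]
        omega
      · have htn : ¬ t = n - 1 := by
          simp only [List.length_cons] at ht; push_cast at ht; omega
        have ht' : t + 1 = n - (((y :: rest').length : Nat) : Int) := by
          simp only [List.length_cons] at ht ⊢; push_cast at ht ⊢; omega
        rw [pvAGo]
        simp only [hx, if_pos, htn, if_neg, not_false_iff, List.nil_append]
        rw [ih (t + 1) (fd + 1) ht' (by omega) (by simp)]
        rw [hk]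
        simp only [List.length_cons, List.drop_succ_cons, Nat.cast_add, Nat.cast_one]
        generalize (List.takeWhile (fun y => decide (thr ≤ y)) (y :: rest')).length = k
        have e0 : t + 1 - (fd + 1) - 1 = t - fd - 1 := by ring
        have e1 : t + 1 + (k : Int) - 1 = t + ((k : Int) + 1) - 1 := by ring
        have e2 : fd + 1 + (k : Int) = fd + ((k : Int) + 1) := by ring
        have e3 : t + 1 + (k : Int) + 1 = t + ((k : Int) + 1) + 1 := by ring
        rw [e0, e1, e2, e3]
    · have hk : (x :: rest).takeWhile (fun y => decide (thr ≤ y)) = [] := by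
        simp [hx]
      have hne1 : ¬ (t + ((0 : Nat) : Int) - 1 = n - 1) := by
        simp only [List.length_cons] at ht; push_cast at ht ⊢; omega
      rw [pvAGo]
      simp only [hx, if_neg, not_false_iff, true_and]
      rw [hk]
      simp only [List.length_nil, Nat.cast_zero, add_zero, List.drop_succ_cons, List.drop_zero]
      by_cases hd : dur ≤ fd
      · rw [if_pos (Or.inr hd), if_pos hd]
        rw [show t - 1 - fd = t - fd - 1 from by ring]
        simp
      · rw [if_neg hd, if_neg (by push_cast at hne1; omega)]
        simp

-- Outside a run: A's neutral-state loop computes exactly B's loop.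
lemma pvAGo_eq_pvBLoop (thr dur n : Int) : ∀ (m : Nat) (xs : List Int) (t : Int),
    xs.length ≤ m → t = n - (xs.length : Int) →
    pvAGo thr dur n xs t false 0 = pvBLoop thr dur n xs t := by
  intro m
  induction m with
  | zero =>
    intro xs t hm _
    have : xs = [] := List.length_eq_zero_iff.mp (Nat.le_zero.mp hm)
    subst this
    rw [pvAGo, pvBLoop]
  | succ m ih =>
    intro xs t hm ht
    rcases xs with _ | ⟨x, rest⟩
    · rw [pvAGo, pvBLoop]
    · by_cases hx : thr ≤ x
      · have hk : (x :: rest).takeWhile (fun y => decide (thr ≤ y)) =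
            x :: rest.takeWhile (fun y => decide (thr ≤ y)) := by
          simp [hx]
        rw [pvAGo, pvBLoop]
        simp only [hx, if_pos, dif_pos]
        rw [hk]
        simp only [List.length_cons, List.drop_succ_cons, Nat.cast_add, Nat.cast_one, zero_add]
        rcases rest with _ | ⟨y, rest'⟩
        · have htn : t = n - 1 := by simp at ht; omega
          rw [show (List.takeWhile (fun y => decide (thr ≤ y)) ([] : List Int)) = [] from rfl]
          simp only [List.length_nil, Nat.cast_zero, zero_add, List.drop_zero]
          rw [if_pos htn, if_pos (Or.inl (by omega)), pvAGo, pvBLoop]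
          simp
        · have htn : ¬ t = n - 1 := by
            simp only [List.length_cons] at ht; push_cast at ht; omega
          rw [if_neg htn]
          rw [pvAGo_inrun thr dur n (y :: rest') (t + 1) 1
            (by simp only [List.length_cons] at ht ⊢; push_cast at ht ⊢; omega) le_rfl (by simp)]
          rw [List.nil_append]
          have hlen := congrArg List.length
            (List.takeWhile_append_dropWhile (p := fun y => decide (thr ≤ y)) (l := y :: rest'))
          simp only [List.length_append] at hlen
          rw [← pv_drop_takeWhile (fun y => decide (thr ≤ y)) (y :: rest')] at hlen
          generalize hK : (List.takeWhile (fun y => decide (thr ≤ y)) (y :: rest')).length = k at *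
          have e0 : t + 1 - 1 - 1 = t - 1 := by ring
          have e1 : t + 1 + (k : Int) - 1 = t + ((k : Int) + 1) - 1 := by ring
          have e2 : (1 : Int) + (k : Int) = (k : Int) + 1 := by ring
          have e3 : t + 1 + (k : Int) + 1 = t + ((k : Int) + 1) + 1 := by ring
          rw [e0, e1, e2, e3]
          congr 1
          rcases hdw : List.drop k (y :: rest') with _ | ⟨z, tail⟩
          · have hlen2 : (y :: rest').length ≤ k := by
              rw [hdw] at hlen; simp only [List.length_nil, Nat.add_zero] at hlen; omega
            rw [List.drop_eq_nil_of_le (Nat.le_succ_of_le hlen2), pvAGo, pvBLoop]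
          · have hz : ¬ thr ≤ z := by
              have := pv_dropWhile_head_false (fun y => decide (thr ≤ y)) (y :: rest') z tail
                (by rw [← pv_drop_takeWhile (fun y => decide (thr ≤ y)) (y :: rest'), hK]; exact hdw)
              simpa using this
            have htail : List.drop (k + 1) (y :: rest') = tail := by
              rw [← List.tail_drop, hdw, List.tail_cons]
            rw [htail, pvBLoop]
            rw [dif_neg hz]
            refine ih tail (t + ((k : Int) + 1) + 1) ?_ ?_
            · rw [hdw] at hlen
              simp only [List.length_cons] at hlen hm
              omega
            · rw [hdw] at hlen
              simp only [List.length_cons] at hlen ht ⊢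
              push_cast at ht ⊢
              omega
      · rw [pvAGo, pvBLoop]
        rw [if_neg hx, dif_neg hx, if_neg (by simp)]
        exact ih rest (t + 1) (by simpa using Nat.lt_succ_iff.mp (by simpa using hm))
          (by simp only [List.length_cons] at ht; push_cast at ht ⊢; omega)

theorem pv_main (xs : List Int) (thr dur : Int) :
    extract_feeding_warnings xs thr dur = extract_feeding_warnings_alt xs thr dur := by
  unfold extract_feeding_warnings extract_feeding_warnings_alt
  rw [pvALoop_eq_acc, List.nil_append,
    pvAGo_eq_pvBLoop thr dur (xs.length : Int) xs.length xs 0 le_rfl (by simp)]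

-- ===== VERDICT (by name: the statement is the Claim_ definition above) =====
theorem extract_feeding_warnings_spec : Claim_equal_extract_feeding_warnings := by
  intro xs thr dur _
  unfold Spec_extract_feeding_warnings
  exact pv_main xs thr dur
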